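-- pv_equiv track=rewrite | github.com/lamvin/PeerReviewAI | code/processing.py | match_citation
-- ===== SOURCE A (Python) =====
-- def match_citation(grouped_citations,references):
--     citIDs = []
--     for ref in references:
--         matched_ref = False
--         for citID in grouped_citations:
--             for version_cit in grouped_citations[citID]:
--                 if version_cit == ref:
--                     citIDs.append(citID)
--                     matched_ref = True
--                     break
--             if matched_ref:
--                 break
--     return citIDs
-- ===== SOURCE B (Python) =====
-- def match_citation(grouped_citations, references):
--     # Build a one-pass index: version string -> first citation ID that has it.
--     lookup = {}
--     for citID in grouped_citations:
--         for version_cit in grouped_citations[citID]: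
--             lookup.setdefault(version_cit, citID)
--     return [lookup[ref] for ref in references if ref in lookup]
-- ===== Notes on version B (the rewrite author's own statement) =====
-- stated objective: faster
-- what changed: Replaces the per-reference rescan of every citation group by a dict from version string to first citation ID built once, then one hash lookup per reference.
import Mathlib
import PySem

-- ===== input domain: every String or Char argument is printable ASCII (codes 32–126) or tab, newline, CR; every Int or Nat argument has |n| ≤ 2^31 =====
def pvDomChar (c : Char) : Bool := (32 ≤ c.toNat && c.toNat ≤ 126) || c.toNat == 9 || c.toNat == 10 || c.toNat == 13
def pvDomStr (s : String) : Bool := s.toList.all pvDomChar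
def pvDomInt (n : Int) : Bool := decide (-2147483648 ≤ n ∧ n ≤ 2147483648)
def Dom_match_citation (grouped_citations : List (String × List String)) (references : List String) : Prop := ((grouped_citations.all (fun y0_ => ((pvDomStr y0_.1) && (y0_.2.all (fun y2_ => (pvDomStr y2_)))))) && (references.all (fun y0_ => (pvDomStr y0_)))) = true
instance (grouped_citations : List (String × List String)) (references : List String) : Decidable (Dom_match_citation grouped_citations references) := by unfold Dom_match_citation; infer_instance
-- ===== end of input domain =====

-- B builds a version-string → first-citID index once and does one lookup per reference; faster than A's rescans.

-- ===== PORT A =====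
-- the middle loop over citation IDs with the matched_ref flag: first group whose versions contain ref
def mcFindCit (grouped_citations : List (String × List String)) (ref : String) : Option String :=
  match grouped_citations with
  | [] => none
  | (citID, versions) :: rest =>
    if versions.any (· == ref) then some citID else mcFindCit rest ref

def match_citation (grouped_citations : List (String × List String)) (references : List String) : List String :=
  references.foldl (fun citIDs ref =>
    match mcFindCit grouped_citations ref with
    | some citID => citIDs ++ [citID]
    | none => citIDs) []

-- ===== PORT B =====
-- lookup.setdefault(v, citID): append (v, citID) only if the key v is absent
def mcSetdefault (d : List (String × String)) (v : String) (citID : String) : List (String × String) :=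
  if (d.find? (fun q => q.1 == v)).isSome then d else d ++ [(v, citID)]

def mcBuildLookup (grouped_citations : List (String × List String)) : List (String × String) :=
  grouped_citations.foldl (fun d p => p.2.foldl (fun d v => mcSetdefault d v p.1) d) []

def match_citation_alt (grouped_citations : List (String × List String)) (references : List String) : List String :=
  let lookup := mcBuildLookup grouped_citations
  references.filterMap (fun ref => ((lookup.find? (fun q => q.1 == ref)).map (·.2)))

-- ===== PRECONDITION & SPEC =====
def Spec_match_citation (grouped_citations : List (String × List String)) (references : List String) (out : List String) : Prop := out = match_citation_alt grouped_citations references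
instance (grouped_citations : List (String × List String)) (references : List String) (out : List String) : Decidable (Spec_match_citation grouped_citations references out) := by unfold Spec_match_citation; infer_instance

-- ===== CLAIM (what is proved, stated in full; the proofs are below) =====
def Claim_equal_match_citation : Prop := ∀ (grouped_citations : List (String × List String)) (references : List String), Dom_match_citation grouped_citations references → Spec_match_citation grouped_citations references (match_citation grouped_citations references)

-- ===== LEMMAS AND PROOFS =====

-- lookup result in an association list
def mcGet (d : List (String × String)) (r : String) : Option String :=
  (d.find? (fun q => q.1 == r)).map (·.2)

theorem mcGet_append (d e : List (String × String)) (r : String) :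
    mcGet (d ++ e) r = (mcGet d r).or (mcGet e r) := by
  simp [mcGet, List.find?_append, Option.map_or]

theorem mcGet_foldl_setdefault (vs : List String) (d : List (String × String)) (cid r : String) :
    mcGet (vs.foldl (fun d v => mcSetdefault d v cid) d) r
      = (mcGet d r).or (if vs.any (· == r) then some cid else none) := by
  induction vs generalizing d with
  | nil => simp
  | cons v vs ih =>
    simp only [List.foldl_cons, List.any_cons, ih]
    by_cases hv : v = r
    · subst hv
      unfold mcSetdefault
      by_cases hd : (List.find? (fun q => q.1 == v) d).isSome
      · obtain ⟨q, hq⟩ := Option.isSome_iff_exists.mp hd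
        have hg : mcGet d v = some q.2 := by simp [mcGet, hq]
        simp [hd, hg]
      · have hn : List.find? (fun q => q.1 == v) d = none :=
          Option.not_isSome_iff_eq_none.mp hd
        have hg : mcGet d v = none := by simp [mcGet, hn]
        have hg' : mcGet (d ++ [(v, cid)]) v = some cid := by
          simp [mcGet, List.find?_append, hn]
        simp [hn, hg', hg]
    · have hvr : (v == r) = false := by simp [hv]
      unfold mcSetdefault
      by_cases hd : (List.find? (fun q => q.1 == v) d).isSome
      · simp [hd, hvr]
      · simp [hd, hvr, mcGet_append]
        cases h : mcGet d r <;> simp [mcGet, hv] at h ⊢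

theorem mcGet_buildLookup (gcs : List (String × List String)) (r : String) :
    mcGet (mcBuildLookup gcs) r = mcFindCit gcs r := by
  unfold mcBuildLookup
  suffices h : ∀ d, mcGet (gcs.foldl (fun d p => p.2.foldl (fun d v => mcSetdefault d v p.1) d) d) r
      = (mcGet d r).or (mcFindCit gcs r) by
    simpa [mcGet] using h []
  induction gcs with
  | nil => simp [mcFindCit]
  | cons p rest ih =>
    intro d
    simp only [List.foldl_cons, ih, mcGet_foldl_setdefault, Option.or_assoc, mcFindCit]
    by_cases hp : p.2.any (· == r) <;> simp [hp]

theorem mc_foldl_filterMap (f : String → Option String) (refs : List String) (init : List String) :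
    refs.foldl (fun acc ref => match f ref with | some c => acc ++ [c] | none => acc) init
      = init ++ refs.filterMap f := by
  induction refs generalizing init with
  | nil => simp
  | cons r refs ih =>
    simp only [List.foldl_cons, List.filterMap_cons]
    cases f r with
    | none => rw [ih]
    | some c => rw [ih]; simp

-- ===== VERDICT (by name: the statement is the Claim_ definition above) =====
theorem match_citation_spec : Claim_equal_match_citation := by
  intro gcs refs _
  show match_citation gcs refs = match_citation_alt gcs refs
  unfold match_citation match_citation_alt
  rw [mc_foldl_filterMap (fun ref => mcFindCit gcs ref) refs []]
  simp only [List.nil_append]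
  congr 1
  funext r
  exact (mcGet_buildLookup gcs r).symm
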